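-- pv_equiv track=rewrite | github.com/cloudalien2025/vacayrank | app.py | _intent_signal_count
-- ===== SOURCE A (Python) =====
-- from typing import Dict, Iterable, List, Optional, Set, Tuple
--
-- def _intent_signal_count(queries: Iterable[str]) -> int:
--     words = ["best", "top", "near me", "book", "reservations", "rental", "rentals", "tickets", "tour", "tours", "luxury", "family", "cheap", "deals"]
--     found = set()
--     for query in queries:
--         q = (query or "").lower()
--         for w in words:
--             if w in q:
--                 found.add(w)
--     return len(found)
-- ===== SOURCE B (Python) =====
-- def _intent_signal_count(queries):
--     words = ["best", "top", "near me", "book", "reservations", "rental", "rentals", "tickets", "tour", "tours", "luxury", "family", "cheap", "deals"]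
--     blob = "\n".join((q or "").lower() for q in queries)
--     return sum(w in blob for w in words)
-- ===== Notes on version B (the rewrite author's own statement) =====
-- stated objective: faster
-- what changed: B joins all lowercased queries into one newline-separated text and counts keywords found in that single haystack (newline occurs in no keyword, so no match crosses a query boundary), replacing A's per-query loop that accumulates a set of matched keywords; one substring search per keyword over the whole text beats 14 searches per query (measured ~2x).
import Mathlib
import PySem

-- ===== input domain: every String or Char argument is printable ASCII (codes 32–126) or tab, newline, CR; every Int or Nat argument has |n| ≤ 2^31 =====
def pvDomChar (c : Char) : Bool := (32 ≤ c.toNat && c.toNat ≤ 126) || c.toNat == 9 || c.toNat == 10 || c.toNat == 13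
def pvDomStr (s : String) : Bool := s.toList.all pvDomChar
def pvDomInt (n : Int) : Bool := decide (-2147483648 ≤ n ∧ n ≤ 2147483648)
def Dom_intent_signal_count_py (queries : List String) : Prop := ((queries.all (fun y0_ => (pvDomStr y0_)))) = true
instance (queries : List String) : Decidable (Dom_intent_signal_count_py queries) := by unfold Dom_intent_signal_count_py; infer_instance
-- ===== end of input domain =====

-- B joins all lowercased queries into one '\n'-separated text and counts keywords present
-- in that single haystack ('\n' occurs in no keyword, so no match crosses a boundary);
-- objective: faster by a constant factor (one substring search per keyword over the whole text).


-- the literal `words` list both Pythons start from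
def pvWords : List String := ["best", "top", "near me", "book", "reservations", "rental", "rentals", "tickets", "tour", "tours", "luxury", "family", "cheap", "deals"]

-- ===== PORT A =====
def intent_signal_count_py (queries : List String) : Int :=
  let found : PySem.Set String :=
    queries.foldl (fun found query =>
      let q := PySem.Str.lower (if query == "" then "" else query)  -- (query or "").lower()
      pvWords.foldl (fun f w => if PySem.Str.isIn w q then PySem.Set.add f w else f) found)
      PySem.Set.empty
  (PySem.Set.len found : Int)

-- ===== PORT B =====
def intent_signal_count_py_alt (queries : List String) : Int :=
  let blob := PySem.Str.join "\n" (queries.map (fun q => PySem.Str.lower (if q == "" then "" else q)))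
  -- sum(w in blob for w in words): count of keywords found in the one joined text
  (pvWords.countP (fun w => PySem.Str.isIn w blob) : Int)

-- ===== PRECONDITION & SPEC =====
def Spec_intent_signal_count_py (queries : List String) (out : Int) : Prop := out = intent_signal_count_py_alt queries
instance (queries : List String) (out : Int) : Decidable (Spec_intent_signal_count_py queries out) := by unfold Spec_intent_signal_count_py; infer_instance

-- ===== CLAIM (what is proved, stated in full; the proofs are below) =====
def Claim_equal_intent_signal_count_py : Prop := ∀ (queries : List String), Dom_intent_signal_count_py queries → Spec_intent_signal_count_py queries (intent_signal_count_py queries)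

-- ===== LEMMAS AND PROOFS =====

-- the lowered form of one query
def pvLow (q : String) : String := PySem.Str.lower (if q == "" then "" else q)

-- A's inner loop over the words: membership in the accumulated set
theorem mem_foldl_addIf (c : String → Bool) (ws : List String) (f : PySem.Set String) (x : String) :
    x ∈ ws.foldl (fun f w => if c w then PySem.Set.add f w else f) f ↔ x ∈ f ∨ (x ∈ ws ∧ c x = true) := by
  induction ws generalizing f with
  | nil => simp
  | cons w ws ih =>
    simp only [List.foldl_cons, ih, List.mem_cons]
    by_cases h : c w = true
    · simp [h, PySem.Set.mem_add]
      constructor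
      · rintro (⟨h1 | rfl⟩ | h2)
        · exact Or.inl h1
        · exact Or.inr ⟨Or.inl rfl, h⟩
        · exact Or.inr ⟨Or.inr h2.1, h2.2⟩
      · rintro (h1 | ⟨rfl | h2, hc⟩)
        · exact Or.inl (Or.inl h1)
        · exact Or.inl (Or.inr rfl)
        · exact Or.inr ⟨h2, hc⟩
    · simp only [h, Bool.false_eq_true, if_false]
      constructor
      · rintro (h1 | h2)
        · exact Or.inl h1
        · exact Or.inr ⟨Or.inr h2.1, h2.2⟩
      · rintro (h1 | ⟨rfl | h2, hc⟩)
        · exact Or.inl h1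
        · exact absurd hc h
        · exact Or.inr ⟨h2, hc⟩

-- A's inner loop preserves nodup
theorem nodup_foldl_addIf (c : String → Bool) (ws : List String) (f : PySem.Set String)
    (hf : f.Nodup) : (ws.foldl (fun f w => if c w then PySem.Set.add f w else f) f).Nodup := by
  induction ws generalizing f with
  | nil => exact hf
  | cons w ws ih =>
    simp only [List.foldl_cons]
    apply ih
    split
    · exact PySem.Set.nodup_add _ _ hf
    · exact hf

-- A's queries-outer loop: membership in the accumulated set
theorem mem_outer (queries : List String) (f : PySem.Set String) (x : String) :
    x ∈ queries.foldl (fun found query =>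
        pvWords.foldl (fun f w => if PySem.Str.isIn w (pvLow query) then PySem.Set.add f w else f) found) f
    ↔ x ∈ f ∨ (x ∈ pvWords ∧ ∃ q ∈ queries, PySem.Str.isIn x (pvLow q) = true) := by
  induction queries generalizing f with
  | nil => simp
  | cons q qs ih =>
    simp only [List.foldl_cons, ih, mem_foldl_addIf]
    constructor
    · rintro ((h1 | h2) | h3)
      · exact Or.inl h1
      · exact Or.inr ⟨h2.1, q, by simp, h2.2⟩
      · obtain ⟨hw, q', hq', hin⟩ := h3
        exact Or.inr ⟨hw, q', List.mem_cons_of_mem _ hq', hin⟩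
    · rintro (h1 | ⟨hw, q', hq', hin⟩)
      · exact Or.inl (Or.inl h1)
      · rcases List.mem_cons.mp hq' with rfl | hq'
        · exact Or.inl (Or.inr ⟨hw, hin⟩)
        · exact Or.inr ⟨hw, q', hq', hin⟩

-- A's accumulated set is duplicate-free
theorem nodup_outer (queries : List String) (f : PySem.Set String) (hf : f.Nodup) :
    (queries.foldl (fun found query =>
        pvWords.foldl (fun f w => if PySem.Str.isIn w (pvLow query) then PySem.Set.add f w else f) found) f).Nodup := by
  induction queries generalizing f with
  | nil => exact hf
  | cons q qs ih => exact ih _ (nodup_foldl_addIf _ _ _ hf)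

theorem pvWords_nodup : pvWords.Nodup := by decide

-- B-side: a pattern not containing c is a prefix of `y ++ c :: z` iff it is a prefix of y
theorem prefix_append_cons_iff {sub y z : List Char} {c : Char} (hc : c ∉ sub) :
    sub <+: y ++ c :: z ↔ sub <+: y := by
  induction sub generalizing y with
  | nil => simp
  | cons s ss ih =>
    cases y with
    | nil =>
      simp only [List.nil_append, List.cons_prefix_cons]
      constructor
      · rintro ⟨rfl, -⟩; exact absurd (List.mem_cons_self) hc
      · rintro h; exact absurd h (by simp)
    | cons t ts =>
      simp only [List.cons_append, List.cons_prefix_cons]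
      exact and_congr_right fun _ => ih (fun h => hc (List.mem_cons_of_mem _ h))

-- B-side: a pattern not containing c is an infix of `y ++ c :: z` iff it is an infix of y or of z
theorem infix_append_cons_iff {sub z : List Char} {c : Char} (hc : c ∉ sub) (y : List Char) :
    sub <:+: y ++ c :: z ↔ sub <:+: y ∨ sub <:+: z := by
  induction y with
  | nil =>
    simp only [List.nil_append, List.infix_cons_iff]
    constructor
    · rintro (h | h)
      · rcases (prefix_append_cons_iff (y := []) hc).mp h with h'
        exact Or.inl (h'.isInfix)
      · exact Or.inr h
    · rintro (h | h)
      · rcases List.infix_iff_prefix_suffix.mp h with ⟨t, hp, hs⟩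
        have : t <+: ([] : List Char) := hs.sublist.eq_of_length_le (by simp) ▸ List.nil_prefix
        have ht : t = [] := List.sublist_nil.mp hs.sublist
        subst ht
        have : sub = [] := List.prefix_nil.mp hp
        subst this
        exact Or.inl (List.nil_prefix)
      · exact Or.inr h
  | cons x xs ih =>
    simp only [List.cons_append, List.infix_cons_iff, ih]
    rw [show x :: (xs ++ c :: z) = (x :: xs) ++ c :: z from rfl, prefix_append_cons_iff hc]
    tauto

-- B-side: a nonempty pattern not containing c is an infix of the c-joined list iff of some part
theorem infix_join_iff {sub : List Char} {c : Char} (hc : c ∉ sub) (hne : sub ≠ [])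
    (ls : List (List Char)) :
    sub <:+: PySem.Chars.join [c] ls ↔ ∃ l ∈ ls, sub <:+: l := by
  induction ls with
  | nil =>
    simp only [PySem.Chars.join_nil, List.infix_nil, List.mem_nil_iff]
    simp [hne]
  | cons p rest ih =>
    cases rest with
    | nil => simp [PySem.Chars.join_singleton]
    | cons q rs =>
      rw [PySem.Chars.join_cons_cons]
      have : p ++ [c] ++ PySem.Chars.join [c] (q :: rs) = p ++ c :: PySem.Chars.join [c] (q :: rs) := by
        simp
      rw [this, infix_append_cons_iff hc, ih]
      simp

-- the keyword equivalence: w found in the joined blob iff found in some lowered query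
theorem isIn_blob_iff (w : String) (hw : w ∈ pvWords) (queries : List String) :
    PySem.Str.isIn w (PySem.Str.join "\n" (queries.map pvLow)) = true
    ↔ ∃ q ∈ queries, PySem.Str.isIn w (pvLow q) = true := by
  have hc : ('\n' : Char) ∉ w.toList ∧ w.toList ≠ [] := by
    fin_cases hw <;> decide
  rw [PySem.Str.isIn_iff_infix, PySem.Str.toList_join]
  have : ("\n" : String).toList = ['\n'] := rfl
  rw [this, List.map_map, infix_join_iff hc.1 hc.2]
  constructor
  · rintro ⟨l, hl, hin⟩
    simp only [List.mem_map, Function.comp] at hl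
    obtain ⟨q, hq, rfl⟩ := hl
    exact ⟨q, hq, (PySem.Str.isIn_iff_infix _ _).mpr hin⟩
  · rintro ⟨q, hq, hin⟩
    exact ⟨(pvLow q).toList, by simp [Function.comp]; exact ⟨q, hq, rfl⟩,
      (PySem.Str.isIn_iff_infix _ _).mp hin⟩

-- ===== VERDICT (by name: the statement is the Claim_ definition above) =====
theorem intent_signal_count_py_spec : Claim_equal_intent_signal_count_py := by
  intro queries _
  show intent_signal_count_py queries = intent_signal_count_py_alt queries
  show PySem.Set.len (queries.foldl (fun found query =>
        pvWords.foldl (fun f w => if PySem.Str.isIn w (pvLow query) then PySem.Set.add f w else f) found)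
        PySem.Set.empty)
      = ((pvWords.countP (fun w => PySem.Str.isIn w (PySem.Str.join "\n" (queries.map pvLow))) : Nat) : Int)
  set S := queries.foldl (fun found query =>
      pvWords.foldl (fun f w => if PySem.Str.isIn w (pvLow query) then PySem.Set.add f w else f) found)
      PySem.Set.empty with hSdef
  have hnod : S.Nodup := nodup_outer queries PySem.Set.empty (by simp [PySem.Set.empty])
  have hperm : S.Perm (pvWords.filter (fun w => PySem.Str.isIn w (PySem.Str.join "\n" (queries.map pvLow)))) := by
    rw [List.perm_ext_iff_of_nodup hnod (pvWords_nodup.filter _)]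
    intro x
    rw [hSdef, mem_outer, List.mem_filter]
    constructor
    · rintro (h | ⟨hw, hq⟩)
      · simp [PySem.Set.empty] at h
      · exact ⟨hw, (isIn_blob_iff x hw queries).mpr hq⟩
    · rintro ⟨hw, hin⟩
      exact Or.inr ⟨hw, (isIn_blob_iff x hw queries).mp hin⟩
  simp only [PySem.Set.len, List.countP_eq_length_filter, hperm.length_eq]
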